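-- pv_equiv track=rewrite | github.com/mannyrayner/C-LARA | clara_app/clara_image_gloss_repository_orm.py | _safe_slug
-- ===== SOURCE A (Python) =====
-- def _safe_slug(s):
--     """
--     Convert a string to a filesystem-safe slug.
--     """
--     if s is None:
--         return ''
--     s = s.strip().lower()
--     # Replace path separators and other awkward characters
--     bad = ['/', '\\', ':', '*', '?', '"', '<', '>', '|', '\n', '\r', '\t']
--     for ch in bad:
--         s = s.replace(ch, ' ')
--     # Collapse spaces and keep a conservative set
--     s = '_'.join(s.split())
--     s = ''.join([c for c in s if (c.isalnum() or c in ['_', '-', '.'])])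
--     return s
-- ===== SOURCE B (Python) =====
-- def _safe_slug(s):
--     """
--     Convert a string to a filesystem-safe slug (single pass).
--     """
--     if s is None:
--         return ''
--     out = []
--     in_word = False
--     first_word_seen = False
--     for c in s.lower():
--         if c.isspace() or c in '/\\:*?"<>|':
--             in_word = False
--         else:
--             if not in_word:
--                 if first_word_seen:
--                     out.append('_')
--                 first_word_seen = True
--                 in_word = True
--             if c.isalnum() or c in '_-.':
--                 out.append(c)
--     return ''.join(out)
-- ===== Notes on version B (the rewrite author's own statement) =====
-- stated objective: alternative
-- what changed: Replaces A's multi-pass pipeline (strip, twelve replace() passes, split, join, filter) by a single explicit pass over the lowered string with in_word/first_word_seen flags that emits word-boundary underscores and kept characters directly.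
import Mathlib
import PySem

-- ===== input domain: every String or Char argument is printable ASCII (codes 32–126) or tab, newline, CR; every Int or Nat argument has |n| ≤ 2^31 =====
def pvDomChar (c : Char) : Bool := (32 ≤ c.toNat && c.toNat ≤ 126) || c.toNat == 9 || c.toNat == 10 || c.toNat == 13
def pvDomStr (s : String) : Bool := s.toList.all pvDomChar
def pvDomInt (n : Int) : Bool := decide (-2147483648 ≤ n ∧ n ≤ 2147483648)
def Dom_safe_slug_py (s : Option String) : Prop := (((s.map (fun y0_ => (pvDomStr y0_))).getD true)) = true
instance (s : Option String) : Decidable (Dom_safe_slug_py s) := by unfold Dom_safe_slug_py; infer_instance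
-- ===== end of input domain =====

-- B replaces A's multi-pass pipeline (strip, twelve replace() passes, split, join, filter) by a
-- single pass over the lowered string with in_word/first_word_seen flags.

-- ===== PORT A =====
-- the bad-character list of A, as one-character strings
def pvBadStrs : List String := ["/", "\\", ":", "*", "?", "\"", "<", ">", "|", "\n", "\r", "\t"]

def safe_slug_py (s : Option String) : String :=
  match s with
  | none => ""
  | some s =>
    let s1 := PySem.Str.lower (PySem.Str.strip s)
    let s2 := pvBadStrs.foldl (fun acc ch => PySem.Str.replace acc ch " ") s1
    let s3 := PySem.Str.join "_" (PySem.Str.split₀ s2)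
    -- ''.join([c for c in s if (c.isalnum() or c in ['_','-','.'])]) : filter over the chars
    String.mk (s3.toList.filter (fun c => PySem.Chars.isalnum c || ((c == '_') || (c == '-') || (c == '.'))))

-- ===== PORT B =====
-- `c in '/\\:*?"<>|'` on a single char c = membership in these chars (exact for 1-char c)
def pvSepChars : List Char := ['/', '\\', ':', '*', '?', '"', '<', '>', '|']

def slugStep (st : List Char × Bool × Bool) (c : Char) : List Char × Bool × Bool :=
  if PySem.Chars.isspace c || pvSepChars.contains c then
    (st.1, false, st.2.2)
  else
    let out1 := if st.2.1 = false then (if st.2.2 then st.1 ++ ['_'] else st.1) else st.1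
    let out2 := if PySem.Chars.isalnum c || ((c == '_') || (c == '-') || (c == '.')) then out1 ++ [c] else out1
    (out2, true, true)

def safe_slug_py_alt (s : Option String) : String :=
  match s with
  | none => ""
  | some s =>
    let r := (PySem.Str.lower s).toList.foldl slugStep ([], false, false)
    String.mk r.1

-- ===== PRECONDITION & SPEC =====
def Spec_safe_slug_py (s : Option String) (out : String) : Prop := out = safe_slug_py_alt s
instance (s : Option String) (out : String) : Decidable (Spec_safe_slug_py s out) := by unfold Spec_safe_slug_py; infer_instance

-- ===== CLAIM (what is proved, stated in full; the proofs are below) =====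
def Claim_equal_safe_slug_py : Prop := ∀ (s : Option String), Dom_safe_slug_py s → Spec_safe_slug_py s (safe_slug_py s)

-- ===== LEMMAS AND PROOFS =====

theorem replace_go_single (o n : Char) :
    ∀ (l : List Char) (fuel : Nat) (acc : List Char), l.length ≤ fuel →
      PySem.Chars.replace.go [o] [n] fuel l acc
        = acc.reverse ++ l.map (fun c => if c = o then n else c) := by
  intro l
  induction l with
  | nil =>
    intro fuel acc h
    cases fuel <;> simp [PySem.Chars.replace.go]
  | cons c t ih =>
    intro fuel acc h
    cases fuel with
    | zero => simp at h
    | succ k =>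
      simp only [PySem.Chars.replace.go, List.isPrefixOf]
      by_cases hc : o = c
      · subst hc
        simp only [beq_self_eq_true, Bool.true_and, if_true]
        rw [show List.drop (List.length [o]) (o :: t) = t by simp]
        rw [ih _ _ (by simpa using h)]
        simp
      · simp only [beq_eq_false_iff_ne.mpr hc, Bool.false_and, if_neg Bool.false_ne_true]
        rw [ih _ _ (by simpa using h)]
        simp [List.map_cons, if_neg (fun hcc : c = o => hc hcc.symm)]

theorem replace_single (o n : Char) (l : List Char) :
    PySem.Chars.replace l [o] [n] = l.map (fun c => if c = o then n else c) := by
  simp [PySem.Chars.replace, replace_go_single o n l l.length [] le_rfl]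

def pvBadChars : List Char := ['/', '\\', ':', '*', '?', '"', '<', '>', '|', '\n', '\r', '\t']
def substC (c : Char) : Char := if pvBadChars.contains c then ' ' else c
theorem foldl_replace_chars (bs : List Char) (l : List Char) :
    bs.foldl (fun acc o => PySem.Chars.replace acc [o] [' ']) l
      = l.map (fun c => bs.foldl (fun x o => if x = o then ' ' else x) c) := by
  induction bs generalizing l with
  | nil => simp
  | cons b bs ih =>
    rw [List.foldl_cons, replace_single, ih, List.map_map]
    rfl

theorem substC_foldl (c : Char) :
    pvBadChars.foldl (fun x o => if x = o then ' ' else x) c = substC c := by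
  by_cases h1 : c = '/'; · subst h1; rfl
  by_cases h2 : c = '\\'; · subst h2; rfl
  by_cases h3 : c = ':'; · subst h3; rfl
  by_cases h4 : c = '*'; · subst h4; rfl
  by_cases h5 : c = '?'; · subst h5; rfl
  by_cases h6 : c = '"'; · subst h6; rfl
  by_cases h7 : c = '<'; · subst h7; rfl
  by_cases h8 : c = '>'; · subst h8; rfl
  by_cases h9 : c = '|'; · subst h9; rfl
  by_cases h10 : c = '\n'; · subst h10; rfl
  by_cases h11 : c = '\r'; · subst h11; rfl
  by_cases h12 : c = '\t'; · subst h12; rfl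
  simp only [pvBadChars, List.foldl_cons, List.foldl_nil, if_neg h1, if_neg h2, if_neg h3,
    if_neg h4, if_neg h5, if_neg h6, if_neg h7, if_neg h8, if_neg h9, if_neg h10, if_neg h11,
    if_neg h12, substC]
  rw [if_neg]
  simp only [List.contains_cons, List.contains_nil, Bool.or_false, Bool.or_eq_true, beq_iff_eq]
  push_neg
  exact ⟨h1, h2, h3, h4, h5, h6, h7, h8, h9, h10, h11, h12⟩

theorem foldl_replace_eq_map (s1 : String) :
    (pvBadStrs.foldl (fun acc ch => PySem.Str.replace acc ch " ") s1).toList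
      = s1.toList.map substC := by
  have h : (pvBadStrs.foldl (fun acc ch => PySem.Str.replace acc ch " ") s1).toList
      = pvBadChars.foldl (fun acc o => PySem.Chars.replace acc [o] [' ']) s1.toList := by
    simp only [pvBadStrs, pvBadChars, List.foldl_cons, List.foldl_nil, PySem.Str.toList_replace]
    rfl
  rw [h, foldl_replace_chars]
  exact List.map_congr_left (fun c _ => substC_foldl c)

def wordsBy (p : Char → Bool) : List Char → List (List Char)
  | [] => []
  | c :: r =>
    if p c then wordsBy p r
    else (c :: r.takeWhile (fun d => !p d)) :: wordsBy p (r.dropWhile (fun d => !p d))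
termination_by l => l.length
decreasing_by
  · simp
  · exact Nat.lt_succ_of_le (List.length_dropWhile_le _ _)

theorem split₀_go_eq : ∀ (s cur : List Char) (acc : List (List Char)),
    PySem.Chars.split₀.go s cur acc
      = acc.reverse ++ (if cur.isEmpty then wordsBy PySem.Chars.isspace s
          else (cur.reverse ++ s.takeWhile (fun d => !PySem.Chars.isspace d))
               :: wordsBy PySem.Chars.isspace (s.dropWhile (fun d => !PySem.Chars.isspace d))) := by
  intro s
  induction s with
  | nil =>
    intro cur acc
    by_cases hc : cur.isEmpty
    · simp [PySem.Chars.split₀.go, hc, wordsBy]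
    · simp [PySem.Chars.split₀.go, hc, wordsBy]
  | cons c rest ih =>
    intro cur acc
    by_cases hs : PySem.Chars.isspace c
    · by_cases hc : cur.isEmpty
      · rw [show PySem.Chars.split₀.go (c :: rest) cur acc = PySem.Chars.split₀.go rest [] acc by
          simp [PySem.Chars.split₀.go, hs, hc]]
        rw [ih [] acc]
        simp [hc, wordsBy, hs]
      · rw [show PySem.Chars.split₀.go (c :: rest) cur acc
            = PySem.Chars.split₀.go rest [] (cur.reverse :: acc) by
          simp [PySem.Chars.split₀.go, hs, hc]]
        rw [ih [] (cur.reverse :: acc)]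
        simp [hc, wordsBy, hs]
    · rw [show PySem.Chars.split₀.go (c :: rest) cur acc
          = PySem.Chars.split₀.go rest (c :: cur) acc by
        simp [PySem.Chars.split₀.go, hs]]
      rw [ih (c :: cur) acc]
      by_cases hc : cur.isEmpty
      · have : cur = [] := by simpa [List.isEmpty_iff] using hc
        subst this
        simp [wordsBy, hs]
      · simp [hc, hs]

theorem split₀_eq_wordsBy (s : List Char) :
    PySem.Chars.split₀ s = wordsBy PySem.Chars.isspace s := by
  simpa using split₀_go_eq s [] []

def sepC (c : Char) : Bool := PySem.Chars.isspace c || pvBadChars.contains c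

theorem isspace_substC (c : Char) : PySem.Chars.isspace (substC c) = sepC c := by
  unfold substC sepC
  by_cases h : pvBadChars.contains c
  · rw [if_pos h, h]
    simp [PySem.Chars.isspace]
  · rw [if_neg h]
    rw [Bool.not_eq_true] at h
    rw [h, Bool.or_false]

theorem isspace_imp_not_isupper (c : Char) :
    PySem.Chars.isspace c = true → PySem.Chars.isupper c = false := by
  intro h
  by_contra hne
  rw [Bool.not_eq_false] at hne
  simp only [PySem.Chars.isupper, Bool.and_eq_true, decide_eq_true_eq, Char.le_def,
    UInt32.le_iff_toNat_le] at hne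
  simp only [PySem.Chars.isspace, Bool.or_eq_true, Bool.and_eq_true, decide_eq_true_eq] at h
  have hA : 'A'.val.toNat = 65 := rfl
  have hZ : 'Z'.val.toNat = 90 := rfl
  have hc : c.toNat = c.val.toNat := rfl
  rw [hA, hZ, ← hc] at hne
  omega

theorem lowerChar_of_isspace {c : Char} (h : PySem.Chars.isspace c = true) :
    PySem.Chars.lowerChar c = c := by
  simp [PySem.Chars.lowerChar, isspace_imp_not_isupper c h]

theorem substC_of_not_sep {c : Char} (h : sepC c = false) : substC c = c := by
  unfold substC
  rw [if_neg]
  intro hc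
  simp only [sepC, Bool.or_eq_false_iff] at h
  rw [h.2] at hc
  exact Bool.false_ne_true hc

theorem wordsBy_all_sep (p : Char → Bool) (sp : List Char) (h : ∀ c ∈ sp, p c = true) :
    wordsBy p sp = [] := by
  induction sp with
  | nil => simp [wordsBy]
  | cons c t ih =>
    rw [wordsBy, if_pos (h c List.mem_cons_self)]
    exact ih (fun d hd => h d (List.mem_cons_of_mem c hd))

theorem takeWhile_append_fail (q : Char → Bool) (r sp : List Char)
    (h : ∀ c ∈ sp, q c = false) : (r ++ sp).takeWhile q = r.takeWhile q := by
  induction r with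
  | nil =>
    cases sp with
    | nil => rfl
    | cons c t => simp [h c List.mem_cons_self]
  | cons c r ih =>
    rw [List.cons_append, List.takeWhile_cons, List.takeWhile_cons]
    by_cases hq : q c
    · rw [if_pos hq, if_pos hq, ih]
    · rw [if_neg hq, if_neg hq]

theorem dropWhile_append_fail (q : Char → Bool) (r sp : List Char)
    (h : ∀ c ∈ sp, q c = false) : (r ++ sp).dropWhile q = r.dropWhile q ++ sp := by
  induction r with
  | nil =>
    cases sp with
    | nil => rfl
    | cons c t => simp [h c List.mem_cons_self]
  | cons c r ih =>
    rw [List.cons_append, List.dropWhile_cons, List.dropWhile_cons]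
    by_cases hq : q c
    · rw [if_pos hq, if_pos hq, ih]
    · rw [if_neg hq, if_neg hq, List.cons_append]

theorem wordsBy_map_subst (L : List Char) :
    wordsBy PySem.Chars.isspace (L.map substC) = wordsBy sepC L := by
  fun_induction wordsBy sepC L with
  | case1 => simp [wordsBy]
  | case2 c r hp ih =>
    rw [List.map_cons, wordsBy, if_pos (by rw [isspace_substC]; exact hp), ih]
  | case3 c r hp ih =>
    rw [Bool.not_eq_true] at hp
    have hsp : PySem.Chars.isspace c = false := by
      have := isspace_substC c
      rw [substC_of_not_sep hp] at this
      rw [this, hp]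
    rw [List.map_cons, wordsBy, if_neg (by rw [substC_of_not_sep hp, hsp]; exact Bool.false_ne_true),
      substC_of_not_sep hp, List.takeWhile_map, List.dropWhile_map]
    have htw : (r.takeWhile ((fun d => !PySem.Chars.isspace d) ∘ substC)).map substC
        = r.takeWhile (fun d => !sepC d) := by
      have hcmp : ((fun d => !PySem.Chars.isspace d) ∘ substC) = (fun d => !sepC d) := by
        funext d; simp [Function.comp, isspace_substC]
      rw [hcmp]
      have : ∀ x ∈ r.takeWhile (fun d => !sepC d), substC x = id x := fun x hx =>
        substC_of_not_sep (by simpa using List.mem_takeWhile_imp hx)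
      rw [List.map_congr_left this, List.map_id]
    have hdw : ((fun d => !PySem.Chars.isspace d) ∘ substC) = (fun d => !sepC d) := by
      funext d; simp [Function.comp, isspace_substC]
    rw [htw, hdw, ih]

theorem wordsBy_prepend_sep (p : Char → Bool) (sp m : List Char) (h : ∀ c ∈ sp, p c = true) :
    wordsBy p (sp ++ m) = wordsBy p m := by
  induction sp with
  | nil => rfl
  | cons c t ih =>
    rw [List.cons_append, wordsBy, if_pos (h c List.mem_cons_self)]
    exact ih (fun d hd => h d (List.mem_cons_of_mem c hd))

theorem wordsBy_append_sep (p : Char → Bool) (m sp : List Char) (h : ∀ c ∈ sp, p c = true) :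
    wordsBy p (m ++ sp) = wordsBy p m := by
  have hq : ∀ c ∈ sp, (fun d => !p d) c = false := fun c hc => by simp [h c hc]
  fun_induction wordsBy p m with
  | case1 => rw [List.nil_append, wordsBy_all_sep p sp h]
  | case2 c r hp ih =>
    simp only [List.cons_append, wordsBy, hp, if_true]
    exact ih
  | case3 c r hp ih =>
    rw [Bool.not_eq_true] at hp
    simp only [List.cons_append, wordsBy, hp, Bool.false_eq_true, if_false,
      takeWhile_append_fail _ _ _ hq, dropWhile_append_fail _ _ _ hq, ih]

def keepC (c : Char) : Bool := PySem.Chars.isalnum c || ((c == '_') || (c == '-') || (c == '.'))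

theorem sep_of_mem_map_lower_space (sp : List Char) (hsp : ∀ d ∈ sp, PySem.Chars.isspace d = true) :
    ∀ c ∈ sp.map PySem.Chars.lowerChar, sepC c = true := by
  intro c hc
  obtain ⟨d, hd, rfl⟩ := List.mem_map.mp hc
  rw [lowerChar_of_isspace (hsp d hd)]
  simp [sepC, hsp d hd]

theorem wordsBy_strip (l : List Char) :
    wordsBy sepC ((PySem.Chars.strip l).map PySem.Chars.lowerChar)
      = wordsBy sepC (l.map PySem.Chars.lowerChar) := by
  have hm : PySem.Chars.lstrip l = List.dropWhile PySem.Chars.isspace l := rfl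
  have h1 : l = l.takeWhile PySem.Chars.isspace ++ PySem.Chars.lstrip l := by
    rw [hm, List.takeWhile_append_dropWhile]
  set m := PySem.Chars.lstrip l with hmdef
  have h2 : m = PySem.Chars.strip l ++ (m.reverse.takeWhile PySem.Chars.isspace).reverse := by
    have : PySem.Chars.strip l = (m.reverse.dropWhile PySem.Chars.isspace).reverse := rfl
    rw [this]
    conv_lhs => rw [← List.reverse_reverse m,
      ← List.takeWhile_append_dropWhile (p := PySem.Chars.isspace) (l := m.reverse)]
    rw [List.reverse_append]
  conv_rhs => rw [h1]
  rw [List.map_append,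
    wordsBy_prepend_sep _ _ _ (sep_of_mem_map_lower_space _ (fun d hd => List.mem_takeWhile_imp hd))]
  conv_rhs => rw [h2]
  rw [List.map_append,
    wordsBy_append_sep _ _ _ (sep_of_mem_map_lower_space _ (fun d hd => by
      have := List.mem_takeWhile_imp (List.mem_reverse.mp hd)
      exact this))]

def joinParts (first : Bool) (ws : List (List Char)) : List Char :=
  match ws with
  | [] => []
  | w :: rest =>
    (if first then ['_'] else []) ++ w.filter keepC
      ++ rest.flatMap (fun w => '_' :: w.filter keepC)

theorem filter_join (ws : List (List Char)) :
    (PySem.Chars.join ['_'] ws).filter keepC = joinParts false ws := by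
  induction ws with
  | nil => simp [PySem.Chars.join_nil, joinParts]
  | cons w rest ih =>
    cases rest with
    | nil => simp [PySem.Chars.join_singleton, joinParts]
    | cons v rest =>
      rw [PySem.Chars.join_cons_cons, List.filter_append, List.filter_append, ih]
      simp only [joinParts, List.flatMap_cons]
      rw [show List.filter keepC ['_'] = ['_'] from rfl]
      simp [List.append_assoc]

def bref : List Char → Bool → Bool → List Char
  | [], _, _ => []
  | c :: r, inWord, first =>
    if PySem.Chars.isspace c || pvSepChars.contains c then bref r false first
    else
      (if inWord then [] else (if first then ['_'] else [])) ++
      (if keepC c then [c] else []) ++ bref r true true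

theorem sepB_eq_sepC (c : Char) :
    (PySem.Chars.isspace c || pvSepChars.contains c) = sepC c := by
  by_cases h : PySem.Chars.isspace c
  · simp [sepC, h]
  · rw [Bool.not_eq_true] at h
    have hn : c ≠ '\n' := fun e => by subst e; exact absurd h (by decide)
    have hr : c ≠ '\r' := fun e => by subst e; exact absurd h (by decide)
    have ht : c ≠ '\t' := fun e => by subst e; exact absurd h (by decide)
    simp only [sepC, h, Bool.false_or, pvSepChars, pvBadChars, List.contains_cons,
      List.contains_nil]
    have en : (c == '\n') = false := beq_eq_false_iff_ne.mpr hn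
    have er : (c == '\r') = false := beq_eq_false_iff_ne.mpr hr
    have et : (c == '\t') = false := beq_eq_false_iff_ne.mpr ht
    rw [en, er, et]
    simp

theorem foldl_slugStep (l : List Char) : ∀ (out : List Char) (inWord first : Bool),
    (l.foldl slugStep (out, inWord, first)).1 = out ++ bref l inWord first := by
  induction l with
  | nil => intro out inWord first; simp [bref]
  | cons c r ih =>
    intro out inWord first
    rw [List.foldl_cons, bref]
    by_cases hs : (PySem.Chars.isspace c || pvSepChars.contains c) = true
    · rw [show slugStep (out, inWord, first) c = (out, false, first) by
        unfold slugStep; rw [if_pos hs]]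
      rw [ih, if_pos hs]
    · rw [Bool.not_eq_true] at hs
      rw [if_neg (by rw [hs]; exact Bool.false_ne_true)]
      cases inWord with
      | true =>
        rw [show slugStep (out, true, first) c
            = ((if keepC c then out ++ [c] else out), true, true) by
          unfold slugStep; rw [if_neg (by rw [hs]; exact Bool.false_ne_true)]; simp [keepC]]
        rw [ih]
        by_cases hk : keepC c = true
        · simp [hk]
        · rw [Bool.not_eq_true] at hk; simp [hk]
      | false =>
        rw [show slugStep (out, false, first) c
            = ((if keepC c then (if first then out ++ ['_'] else out) ++ [c]
                else (if first then out ++ ['_'] else out)), true, true) by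
          unfold slugStep; rw [if_neg (by rw [hs]; exact Bool.false_ne_true)]; simp [keepC]]
        rw [ih]
        by_cases hk : keepC c = true
        · cases first <;> simp [hk]
        · rw [Bool.not_eq_true] at hk; cases first <;> simp [hk]

theorem bref_inword (r : List Char) : bref r true true
    = (r.takeWhile (fun d => !sepC d)).filter keepC
      ++ bref (r.dropWhile (fun d => !sepC d)) false true := by
  induction r with
  | nil => simp [bref]
  | cons c r ih =>
    by_cases hs : sepC c = true
    · rw [bref, if_pos (by rw [sepB_eq_sepC]; exact hs),
        List.takeWhile_cons, List.dropWhile_cons]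
      simp only [hs, Bool.not_true, Bool.false_eq_true, if_false, List.filter_nil,
        List.nil_append]
      rw [bref, if_pos (by rw [sepB_eq_sepC]; exact hs)]
    · rw [Bool.not_eq_true] at hs
      rw [bref, if_neg (by rw [sepB_eq_sepC, hs]; exact Bool.false_ne_true),
        List.takeWhile_cons, List.dropWhile_cons]
      simp only [hs, Bool.not_false, if_true, List.filter_cons, ih]
      by_cases hk : keepC c = true
      · simp [hk]
      · rw [Bool.not_eq_true] at hk; simp [hk]

theorem joinParts_true_flatMap (ws : List (List Char)) :
    joinParts true ws = ws.flatMap (fun w => '_' :: w.filter keepC) := by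
  cases ws with
  | nil => rfl
  | cons w rest => simp [joinParts]

theorem bref_words (L : List Char) : ∀ first : Bool,
    bref L false first = joinParts first (wordsBy sepC L) := by
  fun_induction wordsBy sepC L with
  | case1 => intro first; simp [bref, joinParts]
  | case2 c r hp ih =>
    intro first
    rw [bref, if_pos (by rw [sepB_eq_sepC]; exact hp)]
    exact ih first
  | case3 c r hp ih =>
    intro first
    rw [Bool.not_eq_true] at hp
    rw [bref, if_neg (by rw [sepB_eq_sepC, hp]; exact Bool.false_ne_true),
      bref_inword, ih true, joinParts_true_flatMap]
    simp only [joinParts, List.filter_cons]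
    by_cases hk : keepC c = true
    · cases first <;> simp [hk]
    · rw [Bool.not_eq_true] at hk; cases first <;> simp [hk]

theorem slug_eq (s : Option String) : safe_slug_py s = safe_slug_py_alt s := by
  cases s with
  | none => rfl
  | some s =>
    unfold safe_slug_py safe_slug_py_alt
    apply congrArg String.mk
    rw [foldl_slugStep _ [] false false, List.nil_append]
    rw [PySem.Str.toList_join, PySem.Str.split₀_map_toList]
    have hlist : (pvBadStrs.foldl (fun acc ch => PySem.Str.replace acc ch " ")
        (PySem.Str.lower (PySem.Str.strip s))).toList
        = ((PySem.Chars.strip s.toList).map PySem.Chars.lowerChar).map substC := by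
      rw [foldl_replace_eq_map]
      simp [PySem.Str.toList_lower, PySem.Str.toList_strip, PySem.Chars.lower]
    rw [hlist]
    rw [show ("_" : String).toList = ['_'] from rfl]
    rw [show (fun c => PySem.Chars.isalnum c || ((c == '_') || (c == '-') || (c == '.'))) = keepC from rfl]
    rw [split₀_eq_wordsBy, wordsBy_map_subst, filter_join, wordsBy_strip]
    have hb : (PySem.Str.lower s).toList = s.toList.map PySem.Chars.lowerChar := by
      simp [PySem.Str.toList_lower, PySem.Chars.lower]
    rw [hb, bref_words]

-- ===== VERDICT (by name: the statement is the Claim_ definition above) =====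
theorem safe_slug_py_spec : Claim_equal_safe_slug_py := by
  intro s _
  show safe_slug_py s = safe_slug_py_alt s
  exact slug_eq s
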